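-- pv_equiv track=rewrite | github.com/raeez/chiral-bar-cobar | compute/lib/minimal_model_stabilization.py | detect_eventual_period
-- ===== SOURCE A (Python) =====
-- from typing import Dict, List, Tuple, Optional
--
-- def detect_eventual_period(seq: List[int], period: int,
--                            min_repeats: int = 3) -> Optional[int]:
--     """Find the threshold k_0 such that seq[k+period] == seq[k] for k >= k_0.
--
--     Returns k_0 if found, None otherwise.
--     Requires at least min_repeats consecutive periodic matches.
--     """
--     if len(seq) < period + min_repeats:
--         return None
--
--     # Check from the end backwards
--     n = len(seq)
--     # First verify the last few entries satisfy periodicity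
--     for k in range(n - period - 1, -1, -1):
--         if seq[k + period] != seq[k]:
--             # Periodicity fails at k; threshold is at least k+1
--             threshold = k + 1
--             # Verify enough periodic matches above threshold
--             ok = True
--             for j in range(threshold, n - period):
--                 if seq[j + period] != seq[j]:
--                     ok = False
--                     break
--             if ok and n - period - threshold >= min_repeats:
--                 return threshold
--             return None
--
--     return 0  # Periodic from the start
-- ===== SOURCE B (Python) =====
-- from typing import List, Optional
--
-- def detect_eventual_period(seq: List[int], period: int,
--                            min_repeats: int = 3) -> Optional[int]:
--     """Find the threshold k_0 such that seq[k+period] == seq[k] for k >= k_0."""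
--     if len(seq) < period + min_repeats:
--         return None
--     # One forward pass: threshold ends as (last mismatch index) + 1, or 0.
--     threshold = 0
--     for k, (x, y) in enumerate(zip(seq, seq[period:])):
--         if x != y:
--             threshold = k + 1
--     if len(seq) - period - threshold >= min_repeats:
--         return threshold
--     return None
-- ===== Notes on version B (the rewrite author's own statement) =====
-- stated objective: simpler
-- what changed: A's backward early-stopping scan with an inner re-verification loop is replaced by a single flat forward pass over zip(seq, seq[period:]) that records the last mismatch index + 1 as the threshold, followed by one repeat-count check.
import Mathlib
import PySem

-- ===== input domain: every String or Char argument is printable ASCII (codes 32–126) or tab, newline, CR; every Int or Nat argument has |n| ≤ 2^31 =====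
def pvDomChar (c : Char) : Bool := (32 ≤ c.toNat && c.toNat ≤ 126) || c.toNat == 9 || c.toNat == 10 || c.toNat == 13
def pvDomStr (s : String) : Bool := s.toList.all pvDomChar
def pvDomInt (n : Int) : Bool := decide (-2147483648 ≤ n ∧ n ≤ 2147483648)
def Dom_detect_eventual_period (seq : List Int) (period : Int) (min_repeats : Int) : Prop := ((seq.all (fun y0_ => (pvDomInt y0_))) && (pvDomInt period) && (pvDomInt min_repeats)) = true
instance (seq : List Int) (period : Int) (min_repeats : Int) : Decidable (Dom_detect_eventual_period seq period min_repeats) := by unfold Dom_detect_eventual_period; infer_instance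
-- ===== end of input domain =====

-- B replaces A's backward early-stopping scan plus inner re-verification loop by one flat
-- forward pass recording (last mismatch index)+1, then a single repeat-count check (simpler).


-- ===== PORT A =====
-- inner loop: for j in range(threshold, n - period): if seq[j+period] != seq[j]: ok = False; break
def pvInnerA (seq : List Int) (period n threshold : Int) : Bool :=
  (PySem.List.pyRange threshold (n - period) 1).all
    (fun j => PySem.List.pyGetD seq (j + period) 0 == PySem.List.pyGetD seq j 0)

-- backward loop: for k in range(n - period - 1, -1, -1), early return at the first mismatch
def pvScanA (seq : List Int) (period n min_repeats : Int) : List Int → Option Int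
  | [] => some 0          -- loop ran out: periodic from the start
  | k :: ks =>
    if PySem.List.pyGetD seq (k + period) 0 ≠ PySem.List.pyGetD seq k 0 then
      let threshold := k + 1
      let ok := pvInnerA seq period n threshold
      if ok = true ∧ n - period - threshold ≥ min_repeats then some threshold else none
    else pvScanA seq period n min_repeats ks

def detect_eventual_period (seq : List Int) (period : Int) (min_repeats : Int) : Option Int :=
  if (seq.length : Int) < period + min_repeats then none
  else
    pvScanA seq period (seq.length : Int) min_repeats
      (PySem.List.pyRange ((seq.length : Int) - period - 1) (-1) (-1))

-- ===== PORT B =====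
-- threshold = 0; for k, (x, y) in enumerate(zip(seq, seq[period:])): if x != y: threshold = k + 1
def pvThresholdB (seq : List Int) (period : Int) : Int :=
  (PySem.List.enumerate (seq.zip (PySem.List.slice seq (some period) none)) 0).foldl
    (fun acc kp => if kp.2.1 ≠ kp.2.2 then kp.1 + 1 else acc) 0

def detect_eventual_period_alt (seq : List Int) (period : Int) (min_repeats : Int) : Option Int :=
  if (seq.length : Int) < period + min_repeats then none
  else if (seq.length : Int) - period - pvThresholdB seq period ≥ min_repeats
       then some (pvThresholdB seq period) else none

-- ===== PRECONDITION & SPEC =====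
-- Pre_ excludes exactly the inputs on which A raises IndexError: period < 0 while the length
-- guard does not fire (the backward loop then reads seq[k] at an index k ≥ len(seq)).
def Pre_detect_eventual_period (seq : List Int) (period : Int) (min_repeats : Int) : Prop :=
  0 ≤ period ∨ (seq.length : Int) < period + min_repeats
instance (seq : List Int) (period : Int) (min_repeats : Int) : Decidable (Pre_detect_eventual_period seq period min_repeats) := by unfold Pre_detect_eventual_period; infer_instance

def pvWitness_detect_eventual_period : List Int × Int × Int := ([5, 1, 2, 1, 2, 1, 2], 2, 3)

def Spec_detect_eventual_period (seq : List Int) (period : Int) (min_repeats : Int) (out : Option Int) : Prop := out = detect_eventual_period_alt seq period min_repeats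
instance (seq : List Int) (period : Int) (min_repeats : Int) (out : Option Int) : Decidable (Spec_detect_eventual_period seq period min_repeats out) := by unfold Spec_detect_eventual_period; infer_instance

-- ===== CLAIM (what is proved, stated in full; the proofs are below) =====
def Claim_equal_detect_eventual_period : Prop := ∀ (seq : List Int) (period : Int) (min_repeats : Int), Dom_detect_eventual_period seq period min_repeats → Pre_detect_eventual_period seq period min_repeats → Spec_detect_eventual_period seq period min_repeats (detect_eventual_period seq period min_repeats)

-- ===== LEMMAS AND PROOFS =====

-- last-mismatch invariant for B's fold
theorem pvFold_spec (Z : List (Int × Int)) : ∀ (s a : Int), 0 ≤ a → a ≤ s →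
    (a ≤ (PySem.List.enumerate Z s).foldl (fun acc kp => if kp.2.1 ≠ kp.2.2 then kp.1 + 1 else acc) a ∧
     (PySem.List.enumerate Z s).foldl (fun acc kp => if kp.2.1 ≠ kp.2.2 then kp.1 + 1 else acc) a ≤ s + Z.length ∧
     (∀ j : Nat, j < Z.length →
        (PySem.List.enumerate Z s).foldl (fun acc kp => if kp.2.1 ≠ kp.2.2 then kp.1 + 1 else acc) a ≤ s + j →
        (Z.getD j (0,0)).1 = (Z.getD j (0,0)).2) ∧
     ((PySem.List.enumerate Z s).foldl (fun acc kp => if kp.2.1 ≠ kp.2.2 then kp.1 + 1 else acc) a = a ∨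
      (s + 1 ≤ (PySem.List.enumerate Z s).foldl (fun acc kp => if kp.2.1 ≠ kp.2.2 then kp.1 + 1 else acc) a ∧
       (Z.getD ((PySem.List.enumerate Z s).foldl (fun acc kp => if kp.2.1 ≠ kp.2.2 then kp.1 + 1 else acc) a - s - 1).toNat (0,0)).1 ≠
       (Z.getD ((PySem.List.enumerate Z s).foldl (fun acc kp => if kp.2.1 ≠ kp.2.2 then kp.1 + 1 else acc) a - s - 1).toNat (0,0)).2))) := by
  induction Z with
  | nil =>
    intro s a h0 hs
    simp only [PySem.List.enumerate_nil, List.foldl_nil, List.length_nil]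
    exact ⟨le_refl a, by omega, by intro j hj hr; omega, Or.inl trivial⟩
  | cons z Z ih =>
    intro s a h0 hs
    rw [PySem.List.enumerate_cons]
    simp only [List.foldl_cons]
    by_cases hz : z.1 ≠ z.2
    · -- a' = s + 1
      have := ih (s+1) (s+1) (by omega) (by omega)
      simp only [if_pos hz]
      obtain ⟨h1, h2, h3, h4⟩ := this
      refine ⟨by omega, by simp only [List.length_cons]; push_cast; omega, ?_, ?_⟩
      · intro j hj hr
        match j with
        | 0 => exfalso; omega
        | j+1 =>
          simpa [List.getD_cons_succ] using h3 j (by simpa using hj) (by omega)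
      · rcases h4 with h4 | ⟨h5, h6⟩
        · right
          refine ⟨by omega, ?_⟩
          rw [h4]
          simpa using hz
        · right
          refine ⟨by omega, ?_⟩
          set r := (PySem.List.enumerate Z (s+1)).foldl (fun acc kp => if kp.2.1 ≠ kp.2.2 then kp.1 + 1 else acc) (s+1) with hrdef
          have hx : (r - s - 1).toNat = (r - (s+1) - 1).toNat + 1 := by omega
          rw [hx]
          simpa [List.getD_cons_succ] using h6
    · -- a' = a
      have := ih (s+1) a (by omega) (by omega)
      simp only [if_neg hz]
      obtain ⟨h1, h2, h3, h4⟩ := this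
      simp only [ne_eq, not_not] at hz
      refine ⟨h1, by simp only [List.length_cons]; push_cast; omega, ?_, ?_⟩
      · intro j hj hr
        match j with
        | 0 => simpa using hz
        | j+1 => simpa [List.getD_cons_succ] using h3 j (by simpa using hj) (by omega)
      · rcases h4 with h4 | ⟨h5, h6⟩
        · left; exact h4
        · right
          refine ⟨by omega, ?_⟩
          set r := (PySem.List.enumerate Z (s+1)).foldl (fun acc kp => if kp.2.1 ≠ kp.2.2 then kp.1 + 1 else acc) a with hrdef
          have hx : (r - s - 1).toNat = (r - (s+1) - 1).toNat + 1 := by omega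
          rw [hx]
          simpa [List.getD_cons_succ] using h6


-- A's backward scan, characterized by the last-mismatch threshold T
theorem pvScanA_spec (seq : List Int) (P mr T : Int) (hT0 : 0 ≤ T)
    (hmatch : ∀ j : Nat, (j:Int) < (seq.length:Int) - P → T ≤ (j:Int) →
       PySem.List.pyGetD seq ((j:Int) + P) 0 = PySem.List.pyGetD seq (j:Int) 0)
    (hw : T = 0 ∨ (1 ≤ T ∧ PySem.List.pyGetD seq ((T-1) + P) 0 ≠ PySem.List.pyGetD seq (T-1) 0)) :
    ∀ (k : Nat), (T - 1 + (k:Int)) < (seq.length:Int) - P →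
      pvScanA seq P (seq.length:Int) mr (PySem.List.pyRange (T - 1 + (k:Int)) (-1) (-1)) =
        (if T = 0 then some 0
         else if pvInnerA seq P (seq.length:Int) T = true ∧ (seq.length:Int) - P - T ≥ mr
              then some T else none) := by
  intro k
  induction k with
  | zero =>
    intro hc
    rcases hw with h0 | ⟨hT1, hmis⟩
    · subst h0
      rw [show (0:Int) - 1 + ((0:Nat):Int) = -1 by omega]
      rw [PySem.List.pyRange_neg_one_eq_nil (by omega)]
      simp [pvScanA]
    · rw [if_neg (by omega)]
      rw [show T - 1 + ((0:Nat):Int) = T - 1 by omega]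
      rw [PySem.List.pyRange_neg_one_cons (by omega)]
      rw [pvScanA, if_pos hmis]
      rw [show T - 1 + 1 = T by ring]
  | succ k ih =>
    intro hc
    rw [show ((k+1:Nat):Int) = (k:Int) + 1 by omega] at hc ⊢
    rw [show T - 1 + ((k:Int)+1) = T + k by ring] at hc ⊢
    have h2 : (((T+(k:Int)).toNat:Int)) = T + (k:Int) := by omega
    rw [PySem.List.pyRange_neg_one_cons (by omega : (-1:Int) < T + (k:Int))]
    rw [pvScanA]
    have heq : PySem.List.pyGetD seq ((T + (k:Int)) + P) 0 = PySem.List.pyGetD seq (T + (k:Int)) 0 := by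
      have h1 := hmatch (T + (k:Int)).toNat (by rw [h2]; omega) (by rw [h2]; omega)
      rw [h2] at h1
      exact h1
    rw [if_neg (by simp [heq])]
    rw [show T + (k:Int) - 1 = T - 1 + (k:Int) by ring]
    exact ih (by omega)

theorem pvMain (seq : List Int) (P mr : Int) (hpre : 0 ≤ P ∨ (seq.length:Int) < P + mr) :
    detect_eventual_period seq P mr = detect_eventual_period_alt seq P mr := by
  by_cases hg : (seq.length:Int) < P + mr
  · rw [detect_eventual_period, detect_eventual_period_alt, if_pos hg, if_pos hg]
  · have hP : 0 ≤ P := hpre.resolve_right hg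
    rw [detect_eventual_period, detect_eventual_period_alt, if_neg hg, if_neg hg]
    rw [pvThresholdB, PySem.List.slice_from seq hP]
    set Z := seq.zip (seq.drop P.toNat) with hZ
    have hZlen : Z.length = seq.length - P.toNat := by
      simp [hZ, List.length_zip]
    obtain ⟨hr0, hrM, hmatchZ, hwZ⟩ := pvFold_spec Z 0 0 (le_refl 0) (le_refl 0)
    set T := (PySem.List.enumerate Z 0).foldl
        (fun acc kp => if kp.2.1 ≠ kp.2.2 then kp.1 + 1 else acc) 0 with hT
    simp only [zero_add] at hrM hmatchZ hwZ
    have hget : ∀ j : Nat, j < Z.length → Z.getD j (0,0) = (seq.getD j 0, seq.getD (j + P.toNat) 0) := by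
      intro j hj
      have hjn : j < seq.length := by omega
      have hjp : P.toNat + j < seq.length := by omega
      rw [List.getD_eq_getElem _ _ hj]
      have hzj : Z[j] = (seq[j]'hjn, seq[P.toNat + j]'hjp) := by
        simp [hZ, List.getElem_zip, List.getElem_drop]
      rw [hzj, List.getD_eq_getElem _ _ hjn, List.getD_eq_getElem _ _ (by omega : j + P.toNat < seq.length)]
      congr 2
      omega
    by_cases hM : (seq.length:Int) - P ≤ 0
    · have hZ0 : Z.length = 0 := by omega
      have hZnil : Z = [] := List.eq_nil_of_length_eq_zero hZ0
      have hT0 : T = 0 := by rw [hT, hZnil, PySem.List.enumerate_nil, List.foldl_nil]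
      rw [PySem.List.pyRange_neg_one_eq_nil (by omega), pvScanA]
      rw [hT0, if_pos (by omega)]
    · rw [not_le] at hM
      have hPn : (P.toNat : Int) = P := by omega
      have hlenZ : (Z.length : Int) = (seq.length:Int) - P := by omega
      have hmatchA : ∀ j : Nat, (j:Int) < (seq.length:Int) - P → T ≤ (j:Int) →
          PySem.List.pyGetD seq ((j:Int) + P) 0 = PySem.List.pyGetD seq (j:Int) 0 := by
        intro j hj hTj
        have hjZ : j < Z.length := by omega
        have h := hmatchZ j hjZ (by omega)
        rw [hget j hjZ] at h
        rw [show (j:Int) + P = ((j + P.toNat : Nat) : Int) by omega,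
            PySem.List.pyGetD_natCast, PySem.List.pyGetD_natCast]
        exact h.symm
      have hwA : T = 0 ∨ (1 ≤ T ∧ PySem.List.pyGetD seq ((T-1) + P) 0 ≠ PySem.List.pyGetD seq (T-1) 0) := by
        rcases hwZ with h | ⟨h1, h2⟩
        · exact Or.inl h
        · right
          refine ⟨by omega, ?_⟩
          simp only [show T - 0 - 1 = T - 1 by ring] at h2
          have hidx : (T - 1).toNat < Z.length := by omega
          rw [hget _ hidx] at h2
          rw [show T - 1 + P = (((T-1).toNat + P.toNat : Nat) : Int) by omega,
              show T - 1 = (((T-1).toNat : Nat) : Int) by omega,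
              PySem.List.pyGetD_natCast, PySem.List.pyGetD_natCast]
          exact fun hEq => h2 hEq.symm
      have hrw := pvScanA_spec seq P mr T hr0 hmatchA hwA (((seq.length:Int) - P - T).toNat) (by omega)
      rw [show T - 1 + ((((seq.length:Int) - P - T).toNat : Nat) : Int) = (seq.length:Int) - P - 1 by omega] at hrw
      rw [hrw]
      have hinner : pvInnerA seq P (seq.length:Int) T = true := by
        rw [pvInnerA, List.all_eq_true]
        intro j hj
        rw [PySem.List.mem_pyRange_one] at hj
        obtain ⟨hj1, hj2⟩ := hj
        have h := hmatchA j.toNat (by omega) (by omega)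
        rw [show ((j.toNat : Nat):Int) = j by omega] at h
        simp [h]
      by_cases hTz : T = 0
      · rw [if_pos hTz, hTz]
        rw [if_pos (by omega)]
      · rw [if_neg hTz, hinner]
        simp only [true_and]


-- ===== VERDICT (by name: the statement is the Claim_ definition above) =====
theorem detect_eventual_period_spec : Claim_equal_detect_eventual_period := by
  intro seq period min_repeats _hdom hpre
  unfold Spec_detect_eventual_period
  exact pvMain seq period min_repeats hpre
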